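-- pv_equiv track=rewrite | github.com/MagistrTheOne/MagistrAiBaby | training/constitutional_learning.py | _make_response_safer
-- ===== SOURCE A (Python) =====
-- def _make_response_safer(response):
--     """Make response safer by removing potentially harmful content"""
--     harmful_patterns = {
--         'harm': 'help',
--         'hurt': 'support',
--         'damage': 'improve'
--     }
--
--     safer_response = response
--     for harmful, safe in harmful_patterns.items():
--         safer_response = safer_response.replace(harmful, safe)
--
--     return safer_response
-- ===== SOURCE B (Python) =====
-- def _make_response_safer(response):
--     """Make response safer in ONE left-to-right pass over the string."""
--     subs = {'harm': 'help', 'hurt': 'support', 'damage': 'improve'}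
--     out = []
--     i = 0
--     n = len(response)
--     while i < n:
--         for pat, rep in subs.items():
--             if response.startswith(pat, i):
--                 out.append(rep)
--                 i += len(pat)
--                 break
--         else:
--             out.append(response[i])
--             i += 1
--     return ''.join(out)
-- ===== Notes on version B (the rewrite author's own statement) =====
-- stated objective: alternative
-- what changed: B replaces A's three sequential full-string str.replace passes by a single left-to-right scan that at each position tries the three patterns and emits the substitute or the character, building the output once.
import Mathlib
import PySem

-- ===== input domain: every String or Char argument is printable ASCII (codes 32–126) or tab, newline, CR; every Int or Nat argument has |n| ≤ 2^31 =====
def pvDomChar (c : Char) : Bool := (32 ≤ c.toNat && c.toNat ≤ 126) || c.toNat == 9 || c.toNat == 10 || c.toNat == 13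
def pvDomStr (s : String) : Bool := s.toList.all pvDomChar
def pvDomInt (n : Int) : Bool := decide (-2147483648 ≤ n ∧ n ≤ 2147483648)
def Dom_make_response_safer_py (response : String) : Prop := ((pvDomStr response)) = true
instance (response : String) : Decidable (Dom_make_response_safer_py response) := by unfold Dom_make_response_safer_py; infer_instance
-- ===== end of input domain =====

-- B replaces A's three sequential full-string replace passes by one left-to-right scan; objective: alternative (same result, different traversal).

-- ===== PORT A =====
-- A: safer_response = response, then .replace('harm','help'), .replace('hurt','support'), .replace('damage','improve') in dict insertion order.
def make_response_safer_py (response : String) : String :=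
  let s1 := PySem.Str.replace response "harm" "help"
  let s2 := PySem.Str.replace s1 "hurt" "support"
  let s3 := PySem.Str.replace s2 "damage" "improve"
  s3

-- ===== PORT B =====
-- B: single pass; at each position try 'harm', 'hurt', 'damage' in order, emit the substitute and skip the pattern, else copy one char.
def bGo : List Char → List Char
  | [] => []
  | c :: t =>
    if ['h','a','r','m'].isPrefixOf (c :: t) then
      ['h','e','l','p'] ++ bGo (t.drop 3)
    else if ['h','u','r','t'].isPrefixOf (c :: t) then
      ['s','u','p','p','o','r','t'] ++ bGo (t.drop 3)
    else if ['d','a','m','a','g','e'].isPrefixOf (c :: t) then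
      ['i','m','p','r','o','v','e'] ++ bGo (t.drop 5)
    else c :: bGo t
termination_by l => l.length
decreasing_by all_goals simp

def make_response_safer_py_alt (response : String) : String :=
  String.ofList (bGo response.toList)

-- ===== PRECONDITION & SPEC =====
def Spec_make_response_safer_py (response : String) (out : String) : Prop := out = make_response_safer_py_alt response
instance (response : String) (out : String) : Decidable (Spec_make_response_safer_py response out) := by unfold Spec_make_response_safer_py; infer_instance

-- ===== CLAIM (what is proved, stated in full; the proofs are below) =====
def Claim_equal_make_response_safer_py : Prop := ∀ (response : String), Dom_make_response_safer_py response → Spec_make_response_safer_py response (make_response_safer_py response)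

-- ===== LEMMAS AND PROOFS =====

-- A structural form of Python's single-pattern str.replace scan (exact for nonempty old, see replace_eq_R).
def R (old new : List Char) : List Char → List Char
  | [] => []
  | c :: t =>
    if old.isPrefixOf (c :: t) then new ++ R old new (t.drop (old.length - 1))
    else c :: R old new t
termination_by l => l.length
decreasing_by all_goals simp

theorem R_step (old new : List Char) (c : Char) (t : List Char)
    (h : ¬ old.isPrefixOf (c :: t)) : R old new (c :: t) = c :: R old new t := by
  rw [R]; simp [h]

theorem R_match (old new : List Char) (c : Char) (t : List Char)
    (h : old.isPrefixOf (c :: t)) :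
    R old new (c :: t) = new ++ R old new (t.drop (old.length - 1)) := by
  rw [R]; simp [h]

theorem R_head (old new : List Char) (hnew : new ≠ []) (l : List Char) :
    (R old new l).head? = new.head? ∨ (R old new l).head? = l.head? := by
  cases l with
  | nil => right; simp [R]
  | cons c t =>
    rw [R]
    split
    · left
      cases new with
      | nil => exact absurd rfl hnew
      | cons n ns => simp
    · right; simp

theorem prefix_head {a : Char} {as X : List Char} (h : (a :: as).isPrefixOf X = true) :
    X.head? = some a := by
  cases X with
  | nil => simp [List.isPrefixOf] at h
  | cons x xs =>
    simp [List.isPrefixOf] at h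
    simp [h.1]

def T (t : List Char) : List Char :=
  R ['h','u','r','t'] ['s','u','p','p','o','r','t'] (R ['h','a','r','m'] ['h','e','l','p'] t)

theorem T_step (c : Char) (t : List Char) (hc : ('h' == c) = false) : T (c :: t) = c :: T t := by
  unfold T
  rw [R_step _ _ _ _ (by simp [List.isPrefixOf, hc]), R_step _ _ _ _ (by simp [List.isPrefixOf, hc])]

theorem T_head (t : List Char) :
    (T t).head? = some 's' ∨ (T t).head? = some 'h' ∨ (T t).head? = t.head? := by
  unfold T
  rcases R_head ['h','u','r','t'] ['s','u','p','p','o','r','t'] (by simp)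
      (R ['h','a','r','m'] ['h','e','l','p'] t) with h | h
  · left; simpa using h
  · rcases R_head ['h','a','r','m'] ['h','e','l','p'] (by simp) t with h2 | h2
    · right; left; rw [h, h2]; rfl
    · right; right; rw [h, h2]

theorem aux_hurt (t : List Char) (h : ¬ (['h','u','r','t'].isPrefixOf ('h'::t) = true)) :
    ¬ (['h','u','r','t'].isPrefixOf ('h' :: R ['h','a','r','m'] ['h','e','l','p'] t) = true) := by
  intro hcon
  have hcon' : ['u','r','t'].isPrefixOf (R ['h','a','r','m'] ['h','e','l','p'] t) = true := by
    simpa [List.isPrefixOf] using hcon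
  have h' : ¬ (['u','r','t'].isPrefixOf t = true) := by simpa [List.isPrefixOf] using h
  rcases t with _ | ⟨c2, t2⟩
  · simp [R] at hcon'
  · by_cases h2 : c2 = 'u'
    · subst h2
      rw [R_step _ _ _ _ (by simp [List.isPrefixOf])] at hcon'
      have hcon2 : ['r','t'].isPrefixOf (R ['h','a','r','m'] ['h','e','l','p'] t2) = true := by
        simpa [List.isPrefixOf] using hcon'
      have h2' : ¬ (['r','t'].isPrefixOf t2 = true) := by simpa [List.isPrefixOf] using h'
      rcases t2 with _ | ⟨c3, t3⟩
      · simp [R] at hcon2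
      · by_cases h3 : c3 = 'r'
        · subst h3
          rw [R_step _ _ _ _ (by simp [List.isPrefixOf])] at hcon2
          have hcon3 : ['t'].isPrefixOf (R ['h','a','r','m'] ['h','e','l','p'] t3) = true := by
            simpa [List.isPrefixOf] using hcon2
          have h3' : ¬ (['t'].isPrefixOf t3 = true) := by simpa [List.isPrefixOf] using h2'
          rcases t3 with _ | ⟨c4, t4⟩
          · simp [R] at hcon3
          · by_cases h4 : c4 = 't'
            · subst h4; simp [List.isPrefixOf] at h3'
            · have hh := prefix_head hcon3
              rcases R_head ['h','a','r','m'] ['h','e','l','p'] (by simp) (c4 :: t4) with hx | hx <;>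
                rw [hx] at hh <;> simp_all
        · have hh := prefix_head hcon2
          rcases R_head ['h','a','r','m'] ['h','e','l','p'] (by simp) (c3 :: t3) with hx | hx <;>
            rw [hx] at hh <;> simp_all
    · have hh := prefix_head hcon'
      rcases R_head ['h','a','r','m'] ['h','e','l','p'] (by simp) (c2 :: t2) with hx | hx <;>
        rw [hx] at hh <;> simp_all

theorem aux_dmg (t : List Char) (h : ¬ (['d','a','m','a','g','e'].isPrefixOf ('d'::t) = true)) :
    ¬ (['d','a','m','a','g','e'].isPrefixOf ('d' :: T t) = true) := by
  intro hcon
  have hcon' : ['a','m','a','g','e'].isPrefixOf (T t) = true := by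
    simpa [List.isPrefixOf] using hcon
  have h' : ¬ (['a','m','a','g','e'].isPrefixOf t = true) := by simpa [List.isPrefixOf] using h
  rcases t with _ | ⟨c1, t1⟩
  · simp [T, R] at hcon'
  · by_cases h1 : c1 = 'a'
    · subst h1
      rw [T_step _ _ (by decide)] at hcon'
      have hcon1 : ['m','a','g','e'].isPrefixOf (T t1) = true := by
        simpa [List.isPrefixOf] using hcon'
      have h1' : ¬ (['m','a','g','e'].isPrefixOf t1 = true) := by simpa [List.isPrefixOf] using h'
      rcases t1 with _ | ⟨c2, t2⟩
      · simp [T, R] at hcon1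
      · by_cases h2 : c2 = 'm'
        · subst h2
          rw [T_step _ _ (by decide)] at hcon1
          have hcon2 : ['a','g','e'].isPrefixOf (T t2) = true := by
            simpa [List.isPrefixOf] using hcon1
          have h2' : ¬ (['a','g','e'].isPrefixOf t2 = true) := by simpa [List.isPrefixOf] using h1'
          rcases t2 with _ | ⟨c3, t3⟩
          · simp [T, R] at hcon2
          · by_cases h3 : c3 = 'a'
            · subst h3
              rw [T_step _ _ (by decide)] at hcon2
              have hcon3 : ['g','e'].isPrefixOf (T t3) = true := by
                simpa [List.isPrefixOf] using hcon2
              have h3' : ¬ (['g','e'].isPrefixOf t3 = true) := by simpa [List.isPrefixOf] using h2'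
              rcases t3 with _ | ⟨c4, t4⟩
              · simp [T, R] at hcon3
              · by_cases h4 : c4 = 'g'
                · subst h4
                  rw [T_step _ _ (by decide)] at hcon3
                  have hcon4 : ['e'].isPrefixOf (T t4) = true := by
                    simpa [List.isPrefixOf] using hcon3
                  have h4' : ¬ (['e'].isPrefixOf t4 = true) := by simpa [List.isPrefixOf] using h3'
                  rcases t4 with _ | ⟨c5, t5⟩
                  · simp [T, R] at hcon4
                  · by_cases h5 : c5 = 'e'
                    · subst h5; simp [List.isPrefixOf] at h4'
                    · have hh := prefix_head hcon4
                      rcases T_head (c5 :: t5) with hx | hx | hx <;> rw [hx] at hh <;> simp_all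
                · have hh := prefix_head hcon3
                  rcases T_head (c4 :: t4) with hx | hx | hx <;> rw [hx] at hh <;> simp_all
            · have hh := prefix_head hcon2
              rcases T_head (c3 :: t3) with hx | hx | hx <;> rw [hx] at hh <;> simp_all
        · have hh := prefix_head hcon1
          rcases T_head (c2 :: t2) with hx | hx | hx <;> rw [hx] at hh <;> simp_all
    · have hh := prefix_head hcon'
      rcases T_head (c1 :: t1) with hx | hx | hx <;> rw [hx] at hh <;> simp_all

theorem hu_skip_help (Y : List Char) :
    R ['h','u','r','t'] ['s','u','p','p','o','r','t'] ('h'::'e'::'l'::'p'::Y)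
      = 'h'::'e'::'l'::'p'::R ['h','u','r','t'] ['s','u','p','p','o','r','t'] Y := by
  rw [R_step _ _ _ _ (by simp [List.isPrefixOf]), R_step _ _ _ _ (by simp [List.isPrefixOf]),
      R_step _ _ _ _ (by simp [List.isPrefixOf]), R_step _ _ _ _ (by simp [List.isPrefixOf])]

theorem d_skip_help (Y : List Char) :
    R ['d','a','m','a','g','e'] ['i','m','p','r','o','v','e'] ('h'::'e'::'l'::'p'::Y)
      = 'h'::'e'::'l'::'p'::R ['d','a','m','a','g','e'] ['i','m','p','r','o','v','e'] Y := by
  rw [R_step _ _ _ _ (by simp [List.isPrefixOf]), R_step _ _ _ _ (by simp [List.isPrefixOf]),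
      R_step _ _ _ _ (by simp [List.isPrefixOf]), R_step _ _ _ _ (by simp [List.isPrefixOf])]

theorem ha_skip_hurt (Y : List Char) :
    R ['h','a','r','m'] ['h','e','l','p'] ('h'::'u'::'r'::'t'::Y)
      = 'h'::'u'::'r'::'t'::R ['h','a','r','m'] ['h','e','l','p'] Y := by
  rw [R_step _ _ _ _ (by simp [List.isPrefixOf]), R_step _ _ _ _ (by simp [List.isPrefixOf]),
      R_step _ _ _ _ (by simp [List.isPrefixOf]), R_step _ _ _ _ (by simp [List.isPrefixOf])]

theorem d_skip_sup (Y : List Char) :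
    R ['d','a','m','a','g','e'] ['i','m','p','r','o','v','e'] ('s'::'u'::'p'::'p'::'o'::'r'::'t'::Y)
      = 's'::'u'::'p'::'p'::'o'::'r'::'t'::R ['d','a','m','a','g','e'] ['i','m','p','r','o','v','e'] Y := by
  rw [R_step _ _ _ _ (by simp [List.isPrefixOf]), R_step _ _ _ _ (by simp [List.isPrefixOf]),
      R_step _ _ _ _ (by simp [List.isPrefixOf]), R_step _ _ _ _ (by simp [List.isPrefixOf]),
      R_step _ _ _ _ (by simp [List.isPrefixOf]), R_step _ _ _ _ (by simp [List.isPrefixOf]),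
      R_step _ _ _ _ (by simp [List.isPrefixOf])]

theorem ha_skip_dmg (Y : List Char) :
    R ['h','a','r','m'] ['h','e','l','p'] ('d'::'a'::'m'::'a'::'g'::'e'::Y)
      = 'd'::'a'::'m'::'a'::'g'::'e'::R ['h','a','r','m'] ['h','e','l','p'] Y := by
  rw [R_step _ _ _ _ (by simp [List.isPrefixOf]), R_step _ _ _ _ (by simp [List.isPrefixOf]),
      R_step _ _ _ _ (by simp [List.isPrefixOf]), R_step _ _ _ _ (by simp [List.isPrefixOf]),
      R_step _ _ _ _ (by simp [List.isPrefixOf]), R_step _ _ _ _ (by simp [List.isPrefixOf])]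

theorem hu_skip_dmg (Y : List Char) :
    R ['h','u','r','t'] ['s','u','p','p','o','r','t'] ('d'::'a'::'m'::'a'::'g'::'e'::Y)
      = 'd'::'a'::'m'::'a'::'g'::'e'::R ['h','u','r','t'] ['s','u','p','p','o','r','t'] Y := by
  rw [R_step _ _ _ _ (by simp [List.isPrefixOf]), R_step _ _ _ _ (by simp [List.isPrefixOf]),
      R_step _ _ _ _ (by simp [List.isPrefixOf]), R_step _ _ _ _ (by simp [List.isPrefixOf]),
      R_step _ _ _ _ (by simp [List.isPrefixOf]), R_step _ _ _ _ (by simp [List.isPrefixOf])]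

theorem main_aux : ∀ (n : Nat) (l : List Char), l.length ≤ n →
    R ['d','a','m','a','g','e'] ['i','m','p','r','o','v','e'] (T l) = bGo l := by
  intro n
  induction n with
  | zero =>
    intro l hl
    have : l = [] := by cases l <;> simp_all
    subst this; simp [T, R, bGo]
  | succ n ih =>
    intro l hl
    cases l with
    | nil => simp [T, R, bGo]
    | cons c t =>
      by_cases hp1 : ['h','a','r','m'].isPrefixOf (c :: t) = true
      · obtain ⟨x, hx⟩ := List.isPrefixOf_iff_prefix.mp hp1
        obtain ⟨rfl, rfl⟩ : c = 'h' ∧ t = 'a'::'r'::'m'::x := by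
          simpa using hx.symm
        unfold T
        rw [R_match _ _ _ _ hp1]
        show R _ _ (R ['h','u','r','t'] _ ('h'::'e'::'l'::'p'::(R ['h','a','r','m'] ['h','e','l','p'] x))) = _
        rw [hu_skip_help, d_skip_help]
        rw [bGo, if_pos hp1]
        have := ih x (by simp at hl; omega)
        unfold T at this
        simp [this]
      · by_cases hp2 : ['h','u','r','t'].isPrefixOf (c :: t) = true
        · obtain ⟨x, hx⟩ := List.isPrefixOf_iff_prefix.mp hp2
          obtain ⟨rfl, rfl⟩ : c = 'h' ∧ t = 'u'::'r'::'t'::x := by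
            simpa using hx.symm
          unfold T
          rw [ha_skip_hurt]
          rw [R_match _ _ _ _ (by simp [List.isPrefixOf])]
          show R _ _ ('s'::'u'::'p'::'p'::'o'::'r'::'t'::(R ['h','u','r','t'] _ (R ['h','a','r','m'] _ x))) = _
          rw [d_skip_sup]
          rw [bGo, if_neg hp1, if_pos hp2]
          have := ih x (by simp at hl; omega)
          unfold T at this
          simp [this]
        · by_cases hp3 : ['d','a','m','a','g','e'].isPrefixOf (c :: t) = true
          · obtain ⟨x, hx⟩ := List.isPrefixOf_iff_prefix.mp hp3
            obtain ⟨rfl, rfl⟩ : c = 'd' ∧ t = 'a'::'m'::'a'::'g'::'e'::x := by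
              simpa using hx.symm
            unfold T
            rw [ha_skip_dmg, hu_skip_dmg]
            rw [R_match _ _ _ _ (by simp [List.isPrefixOf])]
            rw [bGo, if_neg hp1, if_neg hp2, if_pos hp3]
            have := ih x (by simp at hl; omega)
            unfold T at this
            simp [this]
          · by_cases hc : c = 'h'
            · subst hc
              unfold T
              rw [R_step _ _ _ _ hp1]
              rw [R_step _ _ _ _ (aux_hurt t hp2)]
              rw [R_step _ _ _ _ (by simp [List.isPrefixOf])]
              rw [bGo, if_neg hp1, if_neg hp2, if_neg (by simp [List.isPrefixOf] : ¬ (['d','a','m','a','g','e'].isPrefixOf ('h'::t) = true))]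
              have := ih t (by simp at hl; omega)
              unfold T at this
              simp [this]
            · by_cases hd : c = 'd'
              · subst hd
                rw [T_step _ _ (by decide)]
                rw [R_step _ _ _ _ (aux_dmg t hp3)]
                rw [bGo, if_neg hp1, if_neg hp2, if_neg hp3]
                simp [ih t (by simp at hl; omega)]
              · have h1 : ∀ Y : List Char, ¬ (['h','a','r','m'].isPrefixOf (c :: Y) = true) := by
                  intro Y; simp [List.isPrefixOf, beq_iff_eq]; intro h; exact absurd h.symm hc
                have h2 : ∀ Y : List Char, ¬ (['h','u','r','t'].isPrefixOf (c :: Y) = true) := by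
                  intro Y; simp [List.isPrefixOf, beq_iff_eq]; intro h; exact absurd h.symm hc
                have h3 : ∀ Y : List Char, ¬ (['d','a','m','a','g','e'].isPrefixOf (c :: Y) = true) := by
                  intro Y; simp [List.isPrefixOf, beq_iff_eq]; intro h; exact absurd h.symm hd
                unfold T
                rw [R_step _ _ _ _ (h1 _), R_step _ _ _ _ (h2 _), R_step _ _ _ _ (h3 _)]
                rw [bGo, if_neg hp1, if_neg hp2, if_neg hp3]
                have := ih t (by simp at hl; omega)
                unfold T at this
                simp [this]

theorem go_eq_R (old new : List Char) (hold : old ≠ []) :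
    ∀ (fuel : Nat) (l acc : List Char), l.length ≤ fuel →
      PySem.Chars.replace.go old new fuel l acc = acc.reverse ++ R old new l := by
  intro fuel
  induction fuel with
  | zero =>
    intro l acc h
    have : l = [] := by cases l <;> simp_all
    subst this
    simp [PySem.Chars.replace.go, R]
  | succ n ih =>
    intro l acc h
    cases l with
    | nil => simp [PySem.Chars.replace.go, R]
    | cons c t =>
      rw [PySem.Chars.replace.go]
      by_cases hp : old.isPrefixOf (c :: t)
      · obtain ⟨o, os, rfl⟩ : ∃ o os, old = o :: os := by
          cases old with
          | nil => exact absurd rfl hold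
          | cons o os => exact ⟨o, os, rfl⟩
        simp only [hp, if_true]
        rw [ih _ _ (by simp at h ⊢; omega)]
        simp [R, hp]
      · simp only [hp]
        rw [ih t (c :: acc) (by simp at h; omega)]
        simp [R, hp]

theorem replace_eq_R (l old new : List Char) (hold : old ≠ []) :
    PySem.Chars.replace l old new = R old new l := by
  rw [PySem.Chars.replace]
  have : old.isEmpty = false := by cases old <;> simp_all
  rw [this]
  simpa using go_eq_R old new hold l.length l [] (le_refl _)

theorem chain_eq_bGo (response : String) :
    PySem.Str.replace (PySem.Str.replace (PySem.Str.replace response "harm" "help") "hurt" "support") "damage" "improve"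
      = String.ofList (bGo response.toList) := by
  simp only [PySem.Str.replace]
  refine congrArg String.ofList ?_
  simp only [String.toList_ofList]
  rw [replace_eq_R _ _ _ (by decide), replace_eq_R _ _ _ (by decide), replace_eq_R _ _ _ (by decide)]
  exact main_aux response.toList.length response.toList le_rfl


-- ===== VERDICT (by name: the statement is the Claim_ definition above) =====
theorem make_response_safer_py_spec : Claim_equal_make_response_safer_py := by
  intro response _
  unfold Spec_make_response_safer_py make_response_safer_py make_response_safer_py_alt
  exact chain_eq_bGo response
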